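-- pv_equiv track=rewrite | github.com/koreader/koreader-base | utils/gen_inkview_h.py | consecutive_version_ranges
-- ===== SOURCE A (Python) =====
-- def consecutive_version_ranges(version_set, all_versions):
--     range_list = []
--     for version in all_versions:
--         if version in version_set:
--             range_list.append(version)
--         elif range_list:
--             yield range_list
--             range_list = []
--     if range_list:
--         yield range_list
-- ===== SOURCE B (Python) =====
-- def consecutive_version_ranges(version_set, all_versions):
--     i, n = 0, len(all_versions)
--     while i < n:
--         first_present = all_versions[i] in version_set
--         j = i + 1
--         while j < n and (all_versions[j] in version_set) == first_present:
--             j += 1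
--         if first_present:
--             yield all_versions[i:j]
--         i = j
-- ===== Notes on version B (the rewrite author's own statement) =====
-- stated objective: alternative
-- what changed: Replaced the accumulator-append-and-flush loop by a two-pointer run scan: each maximal run of equal membership is located by an inner index advance and yielded as a slice, with no accumulator list and no trailing flush.
import Mathlib
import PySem

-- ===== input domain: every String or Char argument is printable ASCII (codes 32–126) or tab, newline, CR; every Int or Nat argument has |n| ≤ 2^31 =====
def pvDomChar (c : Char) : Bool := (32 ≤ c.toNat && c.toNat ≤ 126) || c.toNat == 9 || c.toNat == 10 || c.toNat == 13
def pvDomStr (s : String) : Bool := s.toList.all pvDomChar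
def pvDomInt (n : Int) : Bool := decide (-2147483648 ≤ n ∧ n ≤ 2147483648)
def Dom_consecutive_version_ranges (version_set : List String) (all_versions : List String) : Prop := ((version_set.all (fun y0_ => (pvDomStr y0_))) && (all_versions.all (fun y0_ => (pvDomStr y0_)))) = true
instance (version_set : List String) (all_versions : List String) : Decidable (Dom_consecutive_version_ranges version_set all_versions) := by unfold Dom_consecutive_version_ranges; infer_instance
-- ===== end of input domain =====

-- B replaces A's accumulator-append-and-flush loop with a two-pointer run scan (alternative decomposition, same cost);
-- both are generators: equivalence is about the list of yielded values.

-- ===== PORT A =====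
-- A: fold over all_versions carrying (yielded groups so far, current range_list); trailing flush at the end.
def consecutive_version_ranges (version_set : List String) (all_versions : List String) : List (List String) :=
  let st := all_versions.foldl
    (fun (st : List (List String) × List String) version =>
      if version_set.contains version then (st.1, st.2 ++ [version])
      else if st.2 ≠ [] then (st.1 ++ [st.2], ([] : List String))
      else st)
    ([], [])
  if st.2 ≠ [] then st.1 ++ [st.2] else st.1

-- ===== PORT B =====
-- B's outer while loop over run starts: each step takes the maximal run of equal membership
-- (the inner `j` advance = takeWhile / the slice; the remainder = dropWhile) and yields it if present.
def pvRuns (key : String → Bool) : List String → List (List String)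
  | [] => []
  | x :: xs =>
    let first_present := key x
    (if first_present
       then [x :: xs.takeWhile (fun y => key y == first_present)]
       else [])
    ++ pvRuns key (xs.dropWhile (fun y => key y == first_present))
termination_by l => l.length
decreasing_by
  have h := xs.length_dropWhile_le (p := fun y => key y == key x)
  simpa using Nat.lt_succ_of_le h

def consecutive_version_ranges_alt (version_set : List String) (all_versions : List String) : List (List String) :=
  pvRuns (fun version => version_set.contains version) all_versions

-- ===== PRECONDITION & SPEC =====
def Spec_consecutive_version_ranges (version_set : List String) (all_versions : List String) (out : List (List String)) : Prop := out = consecutive_version_ranges_alt version_set all_versions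
instance (version_set : List String) (all_versions : List String) (out : List (List String)) : Decidable (Spec_consecutive_version_ranges version_set all_versions out) := by unfold Spec_consecutive_version_ranges; infer_instance

-- ===== CLAIM (what is proved, stated in full; the proofs are below) =====
def Claim_equal_consecutive_version_ranges : Prop := ∀ (version_set : List String) (all_versions : List String), Dom_consecutive_version_ranges version_set all_versions → Spec_consecutive_version_ranges version_set all_versions (consecutive_version_ranges version_set all_versions)

-- ===== LEMMAS AND PROOFS =====

-- Recursive characterisation of A's fold state machine, over an abstract membership key.
def pvG (k : String → Bool) (cur : List String) : List String → List (List String)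
  | [] => if cur = [] then [] else [cur]
  | v :: rest =>
    if k v then pvG k (cur ++ [v]) rest
    else if cur = [] then pvG k [] rest
    else cur :: pvG k [] rest

theorem pvA_eq_G (k : String → Bool) (av : List String) :
    ∀ (done : List (List String)) (cur : List String),
      (let st := av.foldl
        (fun (st : List (List String) × List String) version =>
          if k version then (st.1, st.2 ++ [version])
          else if st.2 ≠ [] then (st.1 ++ [st.2], ([] : List String))
          else st)
        (done, cur)
       if st.2 ≠ [] then st.1 ++ [st.2] else st.1) = done ++ pvG k cur av := by
  induction av with
  | nil =>
    intro done cur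
    simp only [List.foldl_nil, pvG]
    by_cases h : cur = [] <;> simp [h]
  | cons v rest ih =>
    intro done cur
    simp only [List.foldl_cons, pvG]
    by_cases hv : k v
    · simp only [hv, if_true]
      exact ih done (cur ++ [v])
    · simp only [hv, Bool.false_eq_true, if_false]
      by_cases hc : cur = []
      · subst hc
        simp only [ne_eq, not_true_eq_false, if_false, reduceIte]
        exact ih done []
      · simp only [ne_eq, hc, not_false_eq_true, if_true, reduceIte]
        have := ih (done ++ [cur]) []
        simpa using this
    
theorem pvRuns_cons (k : String → Bool) (x : String) (xs : List String) :
    pvRuns k (x :: xs) =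
      (if k x then [x :: xs.takeWhile (fun y => k y == k x)] else [])
      ++ pvRuns k (xs.dropWhile (fun y => k y == k x)) := by
  rw [pvRuns]

-- pvRuns ignores leading not-present elements.
theorem pvRuns_dropWhile_false (k : String → Bool) (l : List String) :
    pvRuns k (l.dropWhile (fun y => k y == false)) = pvRuns k l := by
  cases l with
  | nil => rfl
  | cons v rest =>
    by_cases hv : k v
    · rw [List.dropWhile_cons]
      simp [hv]
    · have hv' : k v = false := by simpa using hv
      rw [List.dropWhile_cons]
      simp only [hv', beq_self_eq_true, if_true]
      conv_rhs => rw [pvRuns]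
      simp [hv']

theorem pvG_eq_runs (k : String → Bool) (av : List String) :
    ∀ cur, pvG k cur av =
      (if cur = [] then pvRuns k av
       else (cur ++ av.takeWhile (fun y => k y == true)) ::
            pvRuns k (av.dropWhile (fun y => k y == true))) := by
  induction av with
  | nil =>
    intro cur
    by_cases h : cur = [] <;> simp [pvG, pvRuns, h]
  | cons v rest ih =>
    intro cur
    by_cases hv : k v
    · have lhs : pvG k cur (v :: rest) = pvG k (cur ++ [v]) rest := by
        simp [pvG, hv]
      rw [lhs, ih (cur ++ [v])]
      rw [if_neg (by simp)]
      by_cases hc : cur = []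
      · subst hc
        rw [if_pos rfl, pvRuns_cons]
        simp [hv]
      · simp [hc, hv]
    · have hv' : k v = false := by simpa using hv
      by_cases hc : cur = []
      · subst hc
        have lhs : pvG k [] (v :: rest) = pvG k [] rest := by simp [pvG, hv']
        rw [lhs, ih []]
        conv_rhs => rw [pvRuns]
        simp only [hv', Bool.false_eq_true, if_false, List.nil_append]
        exact (pvRuns_dropWhile_false k rest).symm
      · have lhs : pvG k cur (v :: rest) = cur :: pvG k [] rest := by
          simp [pvG, hv', hc]
        rw [lhs, ih []]
        rw [if_pos rfl, if_neg hc, List.takeWhile_cons, List.dropWhile_cons]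
        simp only [hv']
        rw [if_neg (by decide), if_neg (by decide), pvRuns_cons]
        simp [hv']
        have h3 := pvRuns_dropWhile_false k rest
        simp at h3
        exact h3.symm

-- ===== VERDICT (by name: the statement is the Claim_ definition above) =====
theorem consecutive_version_ranges_spec : Claim_equal_consecutive_version_ranges := by
  intro vs av _
  unfold Spec_consecutive_version_ranges consecutive_version_ranges consecutive_version_ranges_alt
  have h1 := pvA_eq_G (fun version => vs.contains version) av [] []
  simp only [List.nil_append] at h1
  have h2 := pvG_eq_runs (fun version => vs.contains version) av []
  rw [if_pos rfl] at h2
  exact h1.trans h2
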